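-- pv_equiv track=rewrite | github.com/AdrianMessina/Power_Bi_Monitor | core/parsers/tmdl_parser_v2.py | _extract_multiline_backtick
-- ===== SOURCE A (Python) =====
-- from typing import Dict, List, Optional, Any, Tuple
--
-- def _extract_multiline_backtick(lines: List[str], start_idx: int) -> str:
--     """Extract content between triple backticks"""
--     content_lines = []
--     in_block = False
--
--     for i in range(start_idx, len(lines)):
--         line = lines[i]
--
--         if '```' in line:
--             if in_block:
--                 # End of block
--                 break
--             else:
--                 # Start of block
--                 in_block = True
--                 # Check if there's content on the same line
--                 after_backticks = line.split('```', 1)[1]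
--                 if after_backticks.strip():
--                     content_lines.append(after_backticks)
--         elif in_block:
--             content_lines.append(line)
--
--     return '\n'.join(content_lines).strip()
-- ===== SOURCE B (Python) =====
-- from typing import List
--
--
-- def _extract_multiline_backtick(lines: List[str], start_idx: int) -> str:
--     """Extract content between triple backticks (two-phase: locate both fences, then slice)."""
--     open_i = None
--     for i, line in enumerate(lines):
--         if i >= start_idx and '```' in line:
--             open_i = i
--             break
--     if open_i is None:
--         return ''
--     after = lines[open_i].split('```', 1)[1]
--     close_i = next((j for j in range(open_i + 1, len(lines)) if '```' in lines[j]),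
--                    len(lines))
--     content = ([after] if after.strip() else []) + lines[open_i + 1:close_i]
--     return '\n'.join(content).strip()
-- ===== Notes on version B (the rewrite author's own statement) =====
-- stated objective: simpler
-- what changed: Replaces the single stateful scan (in_block/break flags) by two explicit fence searches: find the opening fence index, find the closing fence index after it, and slice the lines between them.
-- outside the precondition, e.g. on _extract_multiline_backtick(['```a', 'b', '```'], -1): A returns '', B returns 'a\nb'; on _extract_multiline_backtick(['a'], -5): A raises IndexError, B returns ''
import Mathlib
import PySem

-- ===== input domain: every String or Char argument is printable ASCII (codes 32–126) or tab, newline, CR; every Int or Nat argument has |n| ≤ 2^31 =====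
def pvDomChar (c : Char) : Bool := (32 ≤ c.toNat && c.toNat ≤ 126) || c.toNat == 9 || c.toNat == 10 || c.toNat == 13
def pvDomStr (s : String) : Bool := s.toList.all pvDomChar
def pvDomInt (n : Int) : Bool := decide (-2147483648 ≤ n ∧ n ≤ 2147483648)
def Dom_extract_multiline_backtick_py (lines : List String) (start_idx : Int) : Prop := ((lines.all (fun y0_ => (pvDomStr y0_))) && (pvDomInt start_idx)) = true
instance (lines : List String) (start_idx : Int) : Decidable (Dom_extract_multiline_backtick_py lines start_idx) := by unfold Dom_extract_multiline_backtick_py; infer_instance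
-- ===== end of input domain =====

-- B replaces A's single stateful scan (in_block/break flags) by two explicit fence
-- searches plus a slice of the lines between them (objective: simpler).

-- ===== PORT A =====
-- one iteration of A's loop body over state (content_lines, in_block, done)
def pvStepA (st : List String × Bool × Bool) (line : String) : List String × Bool × Bool :=
  if st.2.2 then st
  else if PySem.Str.isIn "```" line then
    if st.2.1 then (st.1, st.2.1, true)
    else
      let after := (PySem.List.pyGet? ((PySem.Str.splitMax? line "```" 1).getD []) 1).getD ""
      if PySem.Str.strip after ≠ "" then (st.1 ++ [after], true, false)
      else (st.1, true, false)
  else if st.2.1 then (st.1 ++ [line], true, false)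
  else st

def extract_multiline_backtick_py (lines : List String) (start_idx : Int) : String :=
  let st := (PySem.List.pyRange start_idx (Int.ofNat lines.length) 1).foldl
    (fun st i => pvStepA st ((PySem.List.pyGet? lines i).getD "")) ([], false, false)
  PySem.Str.strip (PySem.Str.join "\n" st.1)

-- ===== PORT B =====
-- first index i ≥ start with '```' in lines[i] (the enumerate loop, carrying the index)
def pvFindOpen (start : Int) (i : Nat) : List String → Option Nat
  | [] => none
  | line :: rest =>
      if start ≤ (i : Int) && PySem.Str.isIn "```" line then some i
      else pvFindOpen start (i + 1) rest

-- first index j (starting at j0) with '```' in the list, else j0 + length (the `next(…, len(lines))`)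
def pvFindClose (j : Nat) : List String → Nat
  | [] => j
  | line :: rest => if PySem.Str.isIn "```" line then j else pvFindClose (j + 1) rest

def extract_multiline_backtick_py_alt (lines : List String) (start_idx : Int) : String :=
  match pvFindOpen start_idx 0 lines with
  | none => ""
  | some oi =>
    let after := (PySem.List.pyGet?
        ((PySem.Str.splitMax? ((PySem.List.pyGet? lines (oi : Int)).getD "") "```" 1).getD []) 1).getD ""
    let ci := pvFindClose (oi + 1) (lines.drop (oi + 1))
    let content := (if PySem.Str.strip after ≠ "" then [after] else []) ++
        PySem.List.slice lines (some ((oi : Int) + 1)) (some (ci : Int))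
    PySem.Str.strip (PySem.Str.join "\n" content)

-- ===== PRECONDITION & SPEC =====
-- Pre_ excludes negative start_idx: there A reads lines[i] with Python's negative-index
-- wraparound (re-scanning trailing lines, and raising IndexError when start_idx < -len(lines)),
-- outside the function's natural domain; B simply scans from the top there.
def Pre_extract_multiline_backtick_py (lines : List String) (start_idx : Int) : Prop :=
  0 ≤ start_idx
instance (lines : List String) (start_idx : Int) : Decidable (Pre_extract_multiline_backtick_py lines start_idx) := by unfold Pre_extract_multiline_backtick_py; infer_instance

def pvWitness_extract_multiline_backtick_py : List String × Int := (["```", "hi", "```"], 0)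

def Spec_extract_multiline_backtick_py (lines : List String) (start_idx : Int) (out : String) : Prop := out = extract_multiline_backtick_py_alt lines start_idx
instance (lines : List String) (start_idx : Int) (out : String) : Decidable (Spec_extract_multiline_backtick_py lines start_idx out) := by unfold Spec_extract_multiline_backtick_py; infer_instance

-- ===== CLAIM (what is proved, stated in full; the proofs are below) =====
def Claim_equal_extract_multiline_backtick_py : Prop := ∀ (lines : List String) (start_idx : Int), Dom_extract_multiline_backtick_py lines start_idx → Pre_extract_multiline_backtick_py lines start_idx → Spec_extract_multiline_backtick_py lines start_idx (extract_multiline_backtick_py lines start_idx)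

-- ===== LEMMAS AND PROOFS =====

def pvNoFence (line : String) : Bool := !PySem.Str.isIn "```" line

def pvInline (line : String) : List String :=
  let after := (PySem.List.pyGet? ((PySem.Str.splitMax? line "```" 1).getD []) 1).getD ""
  if PySem.Str.strip after ≠ "" then [after] else []

-- the content A's loop produces from the suffix it scans
def pvContent (ls : List String) : List String :=
  match ls.dropWhile pvNoFence with
  | [] => []
  | f :: r => pvInline f ++ r.takeWhile pvNoFence

-- A's loop over pyRange reads exactly the dropped suffix
lemma pvMapRangeAux (lines : List String) : ∀ (k s : Nat), lines.length = s + k →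
    (PySem.List.pyRange (s : Int) (Int.ofNat lines.length) 1).map
      (fun i => (PySem.List.pyGet? lines i).getD "") = lines.drop s := by
  intro k
  induction k with
  | zero =>
    intro s hs
    rw [PySem.List.pyRange_one_eq_nil (by simp only [Int.ofNat_eq_natCast]; omega),
        List.drop_eq_nil_of_le (by omega)]
    rfl
  | succ k ih =>
    intro s hs
    have hlt : s < lines.length := by omega
    rw [PySem.List.pyRange_one_cons (by simp only [Int.ofNat_eq_natCast]; exact_mod_cast hlt),
        List.drop_eq_getElem_cons hlt]
    simp only [List.map_cons]
    congr 1
    · simp [PySem.List.pyGet?_natCast, List.getElem?_eq_getElem hlt]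
    · have : ((s : Int) + 1) = ((s + 1 : Nat) : Int) := by push_cast; ring
      rw [this, ih (s + 1) (by omega)]

lemma pvMapRange (lines : List String) (s : Nat) :
    (PySem.List.pyRange (s : Int) (Int.ofNat lines.length) 1).map
      (fun i => (PySem.List.pyGet? lines i).getD "") = lines.drop s := by
  by_cases h : s ≤ lines.length
  · exact pvMapRangeAux lines (lines.length - s) s (by omega)
  · rw [PySem.List.pyRange_one_eq_nil (by simp only [Int.ofNat_eq_natCast]; omega),
        List.drop_eq_nil_of_le (by omega)]
    rfl

-- fold characterizations of A's loop
lemma pvFoldDone (ls : List String) : ∀ c b, ls.foldl pvStepA (c, b, true) = (c, b, true) := by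
  induction ls with
  | nil => intro c b; rfl
  | cons line rest ih => intro c b; simp only [List.foldl_cons, pvStepA]; exact ih c b

lemma pvFoldIn (ls : List String) : ∀ c,
    (ls.foldl pvStepA (c, true, false)).1 = c ++ ls.takeWhile pvNoFence := by
  induction ls with
  | nil => intro c; simp
  | cons line rest ih =>
    intro c
    rw [List.foldl_cons, List.takeWhile_cons]
    by_cases hf : PySem.Str.isIn "```" line = true
    · have hstep : pvStepA (c, true, false) line = (c, true, true) := by
        simp only [pvStepA, hf]; rfl
      have hp : pvNoFence line = false := by simp only [pvNoFence, hf]; rfl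
      rw [hstep, pvFoldDone, hp]
      simp
    · have hf' : PySem.Str.isIn "```" line = false := by
        exact Bool.not_eq_true _ ▸ Bool.of_not_eq_true hf
      have hstep : pvStepA (c, true, false) line = (c ++ [line], true, false) := by
        simp only [pvStepA, hf']; rfl
      have hp : pvNoFence line = true := by simp only [pvNoFence, hf']; rfl
      rw [hstep, ih, hp]
      simp

lemma pvFoldOut (ls : List String) : ∀ c,
    (ls.foldl pvStepA (c, false, false)).1 = c ++ pvContent ls := by
  induction ls with
  | nil => intro c; simp [pvContent]
  | cons line rest ih =>
    intro c
    rw [List.foldl_cons]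
    by_cases hf : PySem.Str.isIn "```" line = true
    · have hp : pvNoFence line = false := by simp only [pvNoFence, hf]; rfl
      have hc : pvContent (line :: rest) = pvInline line ++ rest.takeWhile pvNoFence := by
        unfold pvContent
        rw [List.dropWhile_cons, hp]
        simp
      rw [hc]
      have hstep : pvStepA (c, false, false) line = (c ++ pvInline line, true, false) := by
        simp only [pvStepA, hf, pvInline]
        split_ifs <;> simp_all
      rw [hstep, pvFoldIn]
      simp
    · have hf' : PySem.Str.isIn "```" line = false := by
        exact Bool.not_eq_true _ ▸ Bool.of_not_eq_true hf
      have hp : pvNoFence line = true := by simp only [pvNoFence, hf']; rfl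
      have hc : pvContent (line :: rest) = pvContent rest := by
        unfold pvContent
        rw [List.dropWhile_cons, hp]
        simp
      have hstep : pvStepA (c, false, false) line = (c, false, false) := by
        simp only [pvStepA, hf']; rfl
      rw [hc, hstep, ih]

-- pvFindOpen: while i < start.toNat the scan just advances
lemma pvFindOpenSkip (start : Int) (h : 0 ≤ start) : ∀ (ls : List String) (i : Nat),
    pvFindOpen start i ls = pvFindOpen start (max i start.toNat) (ls.drop (start.toNat - i)) := by
  intro ls
  induction ls with
  | nil => intro i; simp [pvFindOpen]
  | cons line rest ih =>
    intro i
    by_cases hle : start.toNat ≤ i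
    · rw [Nat.sub_eq_zero_of_le hle, Nat.max_eq_left hle]
      rfl
    · have hlt : i < start.toNat := by omega
      have hcond : (start ≤ (i : Int) && PySem.Str.isIn "```" line) = false := by
        have : ¬ (start ≤ (i : Int)) := by omega
        simp [this]
      rw [pvFindOpen, hcond]
      simp only [Bool.false_eq_true, if_false]
      rw [ih (i + 1)]
      have h1 : max (i + 1) start.toNat = max i start.toNat := by omega
      have h2 : start.toNat - i = (start.toNat - (i + 1)) + 1 := by omega
      rw [h1, h2]
      rfl

-- pvFindOpen: once i ≥ start it finds the first fence line
lemma pvFindOpenSearch (start : Int) : ∀ (ls : List String) (i : Nat), start ≤ (i : Int) →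
    pvFindOpen start i ls =
      (match ls.dropWhile pvNoFence with
       | [] => none
       | _ :: _ => some (i + (ls.takeWhile pvNoFence).length)) := by
  intro ls
  induction ls with
  | nil => intro i _; rfl
  | cons line rest ih =>
    intro i hi
    by_cases hf : PySem.Str.isIn "```" line = true
    · have hp : pvNoFence line = false := by simp only [pvNoFence, hf]; rfl
      have hcond : (start ≤ (i : Int) && PySem.Str.isIn "```" line) = true := by
        rw [hf]; simp [hi]
      rw [pvFindOpen, hcond, List.dropWhile_cons, List.takeWhile_cons, hp]
      simp
    · have hf' : PySem.Str.isIn "```" line = false := by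
        exact Bool.not_eq_true _ ▸ Bool.of_not_eq_true hf
      have hp : pvNoFence line = true := by simp only [pvNoFence, hf']; rfl
      have hcond : (start ≤ (i : Int) && PySem.Str.isIn "```" line) = false := by
        rw [hf']; simp
      rw [pvFindOpen, hcond]
      simp only [Bool.false_eq_true, if_false]
      rw [ih (i + 1) (by push_cast; omega), List.dropWhile_cons, List.takeWhile_cons, hp]
      simp only [if_true]
      cases rest.dropWhile pvNoFence with
      | nil => rfl
      | cons a b =>
        simp only [List.length_cons]
        congr 1
        omega

lemma pvFindCloseEq : ∀ (ls : List String) (j : Nat),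
    pvFindClose j ls = j + (ls.takeWhile pvNoFence).length := by
  intro ls
  induction ls with
  | nil => intro j; simp [pvFindClose]
  | cons line rest ih =>
    intro j
    by_cases hf : PySem.Str.isIn "```" line = true
    · have hp : pvNoFence line = false := by simp only [pvNoFence, hf]; rfl
      rw [pvFindClose, hf, List.takeWhile_cons, hp]
      simp
    · have hf' : PySem.Str.isIn "```" line = false := by
        exact Bool.not_eq_true _ ▸ Bool.of_not_eq_true hf
      have hp : pvNoFence line = true := by simp only [pvNoFence, hf']; rfl
      rw [pvFindClose, hf', List.takeWhile_cons, hp]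
      simp only [Bool.false_eq_true, if_false, if_true, List.length_cons]
      rw [ih (j + 1)]
      omega

lemma pvDropTakeWhile (p : String → Bool) (ls : List String) :
    ls.drop (ls.takeWhile p).length = ls.dropWhile p := by
  nth_rewrite 2 [← List.takeWhile_append_dropWhile (p := p) (l := ls)]
  rw [List.drop_left]

lemma pvTakeTakeWhile (p : String → Bool) (ls : List String) :
    ls.take (ls.takeWhile p).length = ls.takeWhile p := by
  nth_rewrite 2 [← List.takeWhile_append_dropWhile (p := p) (l := ls)]
  rw [List.take_left]

-- ===== VERDICT (by name: the statement is the Claim_ definition above) =====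

theorem extract_multiline_backtick_py_spec : Claim_equal_extract_multiline_backtick_py := by
  intro lines start_idx hdom hpre
  unfold Spec_extract_multiline_backtick_py
  unfold Pre_extract_multiline_backtick_py at hpre
  simp only [extract_multiline_backtick_py, extract_multiline_backtick_py_alt]
  set s := start_idx.toNat with hs
  have hcast : start_idx = (s : Int) := (Int.toNat_of_nonneg hpre).symm
  -- A side: fold over the dropped suffix
  rw [hcast, ← List.foldl_map (f := fun i => (PySem.List.pyGet? lines i).getD "") (g := pvStepA),
      pvMapRange lines s, pvFoldOut (lines.drop s) []]
  -- B side: fence indices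
  have hopen : pvFindOpen (s : Int) 0 lines =
      (match (lines.drop s).dropWhile pvNoFence with
       | [] => none
       | _ :: _ => some (s + ((lines.drop s).takeWhile pvNoFence).length)) := by
    rw [pvFindOpenSkip (s : Int) (Int.natCast_nonneg s) lines 0]
    simp only [Nat.sub_zero, Nat.max_eq_right (Nat.zero_le _), Int.toNat_natCast]
    exact pvFindOpenSearch (s : Int) (lines.drop s) s (le_refl _)
  rw [hopen]
  cases hdw : (lines.drop s).dropWhile pvNoFence with
  | nil =>
    simp only [pvContent, hdw]
    rfl
  | cons f r =>
    simp only [pvContent, hdw, List.nil_append]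
    set tl := ((lines.drop s).takeWhile pvNoFence).length with htl
    set oi := s + tl with hoi
    -- lines.drop oi = f :: r
    have hdrop : lines.drop oi = f :: r := by
      rw [hoi, ← List.drop_drop, pvDropTakeWhile, hdw]
    have hoilt : oi < lines.length := by
      have := congrArg List.length hdrop
      simp [List.length_drop] at this
      omega
    have hget : (PySem.List.pyGet? lines (oi : Int)).getD "" = f := by
      have h0 : (lines.drop oi)[0]? = some f := by rw [hdrop]; rfl
      rw [List.getElem?_drop] at h0
      rw [PySem.List.pyGet?_natCast]
      simp only [Nat.add_zero] at h0
      rw [h0]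
      rfl
    have hdrop1 : lines.drop (oi + 1) = r := by
      have : lines.drop (oi + 1) = (lines.drop oi).tail := by
        rw [List.tail_drop]
      rw [this, hdrop]
      rfl
    rw [hget, hdrop1, pvFindCloseEq r (oi + 1)]
    -- the slice is r.takeWhile pvNoFence
    have hslice : PySem.List.slice lines (some ((oi : Int) + 1)) (some ((oi + 1 + (r.takeWhile pvNoFence).length : Nat) : Int))
        = r.takeWhile pvNoFence := by
      have h1 : ((oi : Int) + 1) = ((oi + 1 : Nat) : Int) := by push_cast; ring
      have h2 : ((oi + 1 + (r.takeWhile pvNoFence).length : Nat) : Int)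
          = ((oi + 1 : Nat) : Int) + ((r.takeWhile pvNoFence).length : Int) := by push_cast; ring
      rw [h1, h2, PySem.List.slice_natCast_add, hdrop1, pvTakeTakeWhile]
    rw [hslice]
    unfold pvInline
    by_cases hsb : PySem.Str.strip ((PySem.List.pyGet? ((PySem.Str.splitMax? f "```" 1).getD []) 1).getD "") ≠ ""
    · simp [hsb]
    · simp [hsb]
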